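-- pv_equiv track=rewrite | github.com/Webperf-se/webperf_core | tests/a11y_statement.py | convert_to_month_number
-- ===== SOURCE A (Python) =====
-- def convert_to_month_number(month):
--     """
--     This function converts a month name or number to a month number.
--
--     It checks if the input month starts with any of the short month names in
--     a predefined dictionary and returns the corresponding month number.
--     If the input month does not start with any of the short month
--     names, it returns the input month converted to an integer.
--
--     Parameters:
--     month (str or int): The month name or number to be converted.
--
--     Returns:
--     int: The month number.
--     """
--     month_dict = {
--         'jan': 1, 'feb': 2, 'mar': 3, 'apr': 4,
--         'maj': 5, 'jun': 6, 'jul': 7, 'aug': 8,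
--         'sep': 9, 'okt': 10, 'nov': 11, 'dec': 12
--     }
--     for short_month_name, month_number in month_dict.items():
--         if month.lower().startswith(short_month_name):
--             return month_number
--     return int(month)
-- ===== SOURCE B (Python) =====
-- def convert_to_month_number(month):
--     names = 'janfebmaraprmajjunjulaugsepoktnovdec'
--     key = month.lower()[:3]
--     i = names.find(key)
--     if len(key) == 3 and i != -1 and i % 3 == 0:
--         return i // 3 + 1
--     return int(month)
-- ===== Notes on version B (the rewrite author's own statement) =====
-- stated objective: alternative
-- what changed: Drops the 12-entry dict and its startswith scan entirely: B searches the lowered 3-char prefix in one packed 36-char string of the twelve 3-letter month names with str.find and computes the month number arithmetically as offset//3+1 (valid because the names sit at offsets 0,3,...,33 and none occurs earlier at a multiple-of-3 offset), falling back to int(month).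
import Mathlib
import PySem

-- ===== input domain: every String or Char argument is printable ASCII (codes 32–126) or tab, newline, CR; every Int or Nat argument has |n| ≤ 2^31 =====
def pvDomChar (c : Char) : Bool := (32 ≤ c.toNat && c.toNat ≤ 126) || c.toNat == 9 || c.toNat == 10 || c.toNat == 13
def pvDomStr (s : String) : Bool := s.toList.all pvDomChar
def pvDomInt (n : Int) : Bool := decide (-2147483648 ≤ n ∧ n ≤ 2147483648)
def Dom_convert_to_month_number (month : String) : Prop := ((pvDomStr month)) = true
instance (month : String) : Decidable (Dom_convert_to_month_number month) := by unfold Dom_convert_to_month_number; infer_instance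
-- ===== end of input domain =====

-- B drops A's table-scan entirely: it searches the lowered 3-char prefix in the packed
-- string "janfebmar..." and recovers the month number arithmetically from the hit offset
-- (alternative algorithm; equal wherever A returns).

-- ===== PORT A =====
def monthPairs : List (String × Int) :=
  [("jan", 1), ("feb", 2), ("mar", 3), ("apr", 4),
   ("maj", 5), ("jun", 6), ("jul", 7), ("aug", 8),
   ("sep", 9), ("okt", 10), ("nov", 11), ("dec", 12)]

-- the for-loop over month_dict.items(); the final int(month) raises ValueError exactly
-- where ofStr? is none (those inputs are excluded by Pre_, the .getD 0 is never reached there)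
def convLoop : List (String × Int) → String → Int
  | [], month => (PySem.Int.ofStr? month).getD 0
  | (k, v) :: rest, month =>
      if PySem.Str.startswith (PySem.Str.lower month) k then v else convLoop rest month

def convert_to_month_number (month : String) : Int :=
  convLoop monthPairs month

-- ===== PORT B =====
def convert_to_month_number_alt (month : String) : Int :=
  let names : String := "janfebmaraprmajjunjulaugsepoktnovdec"
  let key := PySem.Str.slice (PySem.Str.lower month) none (some 3)
  let i := PySem.Str.find names key
  if PySem.Str.len key == 3 && !(i == -1) && PySem.Int.mod i 3 == 0 then
    PySem.Int.floordiv i 3 + 1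
  else (PySem.Int.ofStr? month).getD 0

-- ===== PRECONDITION & SPEC =====
-- Pre_ excludes exactly the inputs on which A raises ValueError: month neither starts
-- (case-insensitively) with one of the 12 short month names nor parses as a Python int.
def Pre_convert_to_month_number (month : String) : Prop :=
  ((PySem.Str.lower month).toList.take 3 ∈
      ["jan", "feb", "mar", "apr", "maj", "jun", "jul", "aug",
       "sep", "okt", "nov", "dec"].map String.toList)
  ∨ (PySem.Int.ofStr? month).isSome = true
instance (month : String) : Decidable (Pre_convert_to_month_number month) := by
  unfold Pre_convert_to_month_number; infer_instance

def pvWitness_convert_to_month_number : String := "March"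

def Spec_convert_to_month_number (month : String) (out : Int) : Prop := out = convert_to_month_number_alt month
instance (month : String) (out : Int) : Decidable (Spec_convert_to_month_number month out) := by unfold Spec_convert_to_month_number; infer_instance

-- ===== CLAIM (what is proved, stated in full; the proofs are below) =====
def Claim_equal_convert_to_month_number : Prop := ∀ (month : String), Dom_convert_to_month_number month → Pre_convert_to_month_number month → Spec_convert_to_month_number month (convert_to_month_number month)

-- ===== LEMMAS AND PROOFS =====

def keyLists : List (List Char) :=
  ["jan", "feb", "mar", "apr", "maj", "jun", "jul", "aug",
   "sep", "okt", "nov", "dec"].map String.toList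

def namesL : List Char := "janfebmaraprmajjunjulaugsepoktnovdec".toList

-- Core lemma, over the (≤ 3)-char lowered prefix t and the shared fallback value d:
-- A's if-chain over the 12 keys equals B's find-and-divide expression.
theorem chain_eq_find (t : List Char) (ht : t.length ≤ 3) (d : Int) :
    (if t == "jan".toList then (1:Int) else if t == "feb".toList then 2 else
     if t == "mar".toList then 3 else if t == "apr".toList then 4 else
     if t == "maj".toList then 5 else if t == "jun".toList then 6 else
     if t == "jul".toList then 7 else if t == "aug".toList then 8 else
     if t == "sep".toList then 9 else if t == "okt".toList then 10 else
     if t == "nov".toList then 11 else if t == "dec".toList then 12 else d)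
    = (if ((t.length : Int) == 3) && !(PySem.Chars.find namesL t == -1)
          && PySem.Int.mod (PySem.Chars.find namesL t) 3 == 0 then
         PySem.Int.floordiv (PySem.Chars.find namesL t) 3 + 1
       else d) := by
  have hne : ∀ k : List Char, t ≠ k → (t == k) = false := fun k h => beq_eq_false_iff_ne.mpr h
  by_cases h3 : t.length = 3
  · by_cases hmem : t ∈ keyLists
    · simp only [keyLists, List.map, List.mem_cons, List.not_mem_nil, or_false] at hmem
      rcases hmem with h|h|h|h|h|h|h|h|h|h|h|h <;> subst h <;> rfl
    · have hni : ∀ k : List Char, k ∈ keyLists → (t == k) = false :=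
        fun k hk => hne k (fun h => hmem (h ▸ hk))
      rw [hni _ (by decide), hni _ (by decide), hni _ (by decide), hni _ (by decide),
          hni _ (by decide), hni _ (by decide), hni _ (by decide), hni _ (by decide),
          hni _ (by decide), hni _ (by decide), hni _ (by decide), hni _ (by decide)]
      have hcond : (((t.length : Int) == 3) && !(PySem.Chars.find namesL t == -1)
          && PySem.Int.mod (PySem.Chars.find namesL t) 3 == 0) = false := by
        by_contra hc
        rw [Bool.not_eq_false, Bool.and_assoc, Bool.and_eq_true, Bool.and_eq_true] at hc
        obtain ⟨-, hnem1, hmod⟩ := hc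
        set n := PySem.Chars.find namesL t with hn
        have hge : 0 ≤ n := by
          have h1 := PySem.Chars.neg_one_le_find (s := namesL) (sub := t)
          have h2 : n ≠ -1 := by simpa using hnem1
          omega
        obtain ⟨hpre, -⟩ := PySem.Chars.find_spec (s := namesL) (sub := t) hge
        have hlen : n.toNat ≤ 33 := by
          have := hpre.length_le
          simp only [List.length_drop] at this
          have hlenN : namesL.length = 36 := by decide
          omega
        have hm : n.toNat % 3 = 0 := by
          have : PySem.Int.mod n 3 = n % 3 := PySem.Int.mod_eq_emod_of_pos (by norm_num)
          have h2 : n % 3 = 0 := by have := (beq_iff_eq).mp hmod; omega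
          omega
        have ht' : t = (namesL.drop n.toNat).take 3 := by
          have := List.prefix_iff_eq_take.mp hpre
          rwa [h3] at this
        have hall : ∀ m : Nat, m < 34 → m % 3 = 0 → (namesL.drop m).take 3 ∈ keyLists := by decide
        have hkin : t ∈ keyLists := ht' ▸ hall n.toNat (by omega) hm
        exact hmem hkin
      rw [hcond]
      simp
  · have hneq : ∀ k : List Char, k.length = 3 → (t == k) = false := by
      intro k hk
      exact hne k (fun h => h3 (h ▸ hk))
    rw [hneq _ rfl, hneq _ rfl, hneq _ rfl, hneq _ rfl, hneq _ rfl, hneq _ rfl,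
        hneq _ rfl, hneq _ rfl, hneq _ rfl, hneq _ rfl, hneq _ rfl, hneq _ rfl]
    have : ((t.length : Int) == 3) = false := by
      rw [beq_eq_false_iff_ne]
      exact_mod_cast h3
    rw [this]
    simp

theorem conv_eq (month : String) :
    convert_to_month_number month = convert_to_month_number_alt month := by
  have hsw : ∀ k : String, k.toList.length = 3 →
      PySem.Str.startswith (PySem.Str.lower month) k
        = ((PySem.Str.lower month).toList.take 3 == k.toList) := by
    intro k hk
    rw [Bool.eq_iff_iff, beq_iff_eq]
    rw [show PySem.Str.startswith (PySem.Str.lower month) k = true ↔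
        k.toList <+: (PySem.Str.lower month).toList by simp [PySem.Chars.startswith_iff]]
    rw [List.prefix_iff_eq_take, hk, eq_comm]
  have hkey : (PySem.Str.slice (PySem.Str.lower month) none (some 3)).toList
      = (PySem.Str.lower month).toList.take 3 := by
    simp
    rw [show ((3:Int)) = ((3:Nat):Int) by norm_num, PySem.List.slice_to_natCast]
  have hlen : ((PySem.Str.lower month).toList.take 3).length ≤ 3 := by
    simp
  simp only [convert_to_month_number, monthPairs, convLoop,
    hsw "jan" rfl, hsw "feb" rfl, hsw "mar" rfl, hsw "apr" rfl, hsw "maj" rfl,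
    hsw "jun" rfl, hsw "jul" rfl, hsw "aug" rfl, hsw "sep" rfl, hsw "okt" rfl,
    hsw "nov" rfl, hsw "dec" rfl]
  rw [chain_eq_find _ hlen]
  simp only [convert_to_month_number_alt]
  rw [show PySem.Str.find "janfebmaraprmajjunjulaugsepoktnovdec"
        (PySem.Str.slice (PySem.Str.lower month) none (some 3))
      = PySem.Chars.find namesL (PySem.Str.slice (PySem.Str.lower month) none (some 3)).toList
    from by simp [namesL]]
  rw [show PySem.Str.len (PySem.Str.slice (PySem.Str.lower month) none (some 3))
      = ((PySem.Str.slice (PySem.Str.lower month) none (some 3)).toList.length : Int)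
    from by simp]
  rw [hkey]

-- ===== VERDICT (by name: the statement is the Claim_ definition above) =====
theorem convert_to_month_number_spec : Claim_equal_convert_to_month_number := by
  intro month _ _
  exact conv_eq month
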